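-- pv_equiv track=rewrite | github.com/kearseya/teltool | cteltool/rollingkutils.py | hash2seq
-- ===== SOURCE A (Python) =====
-- def twobit_2_base():
--     return {0: "A", 1: "C", 2: "G", 3: "T"}
--
-- def hash2seq(v, k):
--     twobit_2_base_d = twobit_2_base()
--     seq = ""
--     v = int(v)  # python int
--     for _ in range(k):
--         seq += twobit_2_base_d[v & 3]
--         v = v >> 2
--     return seq[::-1]
-- ===== SOURCE B (Python) =====
-- def hash2seq(v, k):
--     bases = "ACGT"
--     blocks = [a + b + c + d for a in bases for b in bases for c in bases for d in bases]
--     if k <= 0: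
--         return ""
--     u = int(v) % (4 ** k)          # canonical low 2k bits (handles negatives)
--     nblocks = -(-k // 4)
--     full = "".join(blocks[(u >> (8 * j)) & 255] for j in range(nblocks - 1, -1, -1))
--     return full[len(full) - k:]
-- ===== Notes on version B (the rewrite author's own statement) =====
-- stated objective: faster
-- what changed: B first reduces v modulo 4**k to its canonical low bits, then decodes four bases per step through a precomputed 256-entry byte-to-4-base block table and trims the padding, instead of A's per-digit dict lookup loop with a quadratic string accumulator and final reversal.
import Mathlib
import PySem

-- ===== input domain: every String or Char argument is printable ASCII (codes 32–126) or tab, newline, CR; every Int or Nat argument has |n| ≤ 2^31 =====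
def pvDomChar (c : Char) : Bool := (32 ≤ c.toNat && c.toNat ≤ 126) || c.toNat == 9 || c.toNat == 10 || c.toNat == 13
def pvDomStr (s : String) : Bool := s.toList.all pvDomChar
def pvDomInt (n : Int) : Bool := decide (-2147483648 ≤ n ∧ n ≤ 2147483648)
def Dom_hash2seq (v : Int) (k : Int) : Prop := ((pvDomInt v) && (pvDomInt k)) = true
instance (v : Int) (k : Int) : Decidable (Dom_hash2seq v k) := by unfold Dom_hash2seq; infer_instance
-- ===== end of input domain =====

-- B decodes in 4-base blocks through a precomputed 256-entry table after reducing v modulo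
-- 4**k, instead of A's per-digit dict lookups with an accumulator and final reversal;
-- return values proved equal for all inputs.

-- ===== PORT A =====
-- Python str is modelled as List Char (String.ofList at the end) — exact on the ASCII domain.
def twobit2base : PySem.Dict Int (List Char) :=
  PySem.Dict.ofList [((0 : Int), ['A']), (1, ['C']), (2, ['G']), (3, ['T'])]

-- one body of A's 'for _ in range(k)' loop; 'v & 3' is exactly 'v mod 4' (floor mod) on every
-- Python int, and 'v >> 2' is Lean's '>>> 2' (floors, also on negatives) — both exact.
-- The dict lookup cannot miss (mod v 4 ∈ {0,1,2,3}), so getD's default is never used.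
def hash2seqStep (st : List Char × Int) : List Char × Int :=
  (st.1 ++ twobit2base.getD (PySem.Int.mod st.2 4) [], st.2 >>> (2 : Nat))

def hash2seq (v : Int) (k : Int) : String :=
  let r := (PySem.List.pyRange 0 k 1).foldl (fun st _ => hash2seqStep st) ([], v)
  String.ofList ((PySem.List.slice? r.1 none none (-1)).getD [])  -- seq[::-1]

-- ===== PORT B =====
def basesB : List Char := ['A', 'C', 'G', 'T']

-- the 256-entry block table: blocks[n] = the 4 bases of byte n, most significant first
-- (Python's nested comprehension over "ACGT", ported as nested flatMap/map)
def blocksB : List (List Char) :=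
  basesB.flatMap (fun a => basesB.flatMap (fun b =>
    basesB.flatMap (fun c => basesB.map (fun d => [a, b, c, d]))))

-- 'u % 4**k' is floor mod by a positive modulus; '(u >> (8*j)) & 255' is 'mod _ 256'; every j
-- of range(nblocks-1,-1,-1) is ≥ 0, so '.toNat' on the shift amount is exact; ''.join of the
-- generated 4-char strings is flatten; 'full[len(full)-k:]' is PySem.List.slice with that start.
def hash2seq_alt (v : Int) (k : Int) : String :=
  if k ≤ 0 then "" else
    let u := PySem.Int.mod v ((4 : Int) ^ k.toNat)
    let nb := -(PySem.Int.floordiv (-k) 4)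
    let full := ((PySem.List.pyRange (nb - 1) (-1) (-1)).map
      (fun j => PySem.List.pyGetD blocksB (PySem.Int.mod (u >>> (8 * j).toNat) 256) [])).flatten
    String.ofList (PySem.List.slice full (some ((full.length : Int) - k)) none)

-- ===== PRECONDITION & SPEC =====
def Spec_hash2seq (v : Int) (k : Int) (out : String) : Prop := out = hash2seq_alt v k
instance (v : Int) (k : Int) (out : String) : Decidable (Spec_hash2seq v k out) := by unfold Spec_hash2seq; infer_instance

-- ===== CLAIM (what is proved, stated in full; the proofs are below) =====
def Claim_equal_hash2seq : Prop := ∀ (v : Int) (k : Int), Dom_hash2seq v k → Spec_hash2seq v k (hash2seq v k)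

-- ===== LEMMAS AND PROOFS =====

-- the base character of a 2-bit group
def digitChar (x : Int) : Char := PySem.List.pyGetD basesB (PySem.Int.mod x 4) 'A'

theorem digitChar_congr {x y : Int} (h : x % 4 = y % 4) : digitChar x = digitChar y := by
  unfold digitChar
  rw [PySem.Int.mod_eq_emod_of_pos (by norm_num), PySem.Int.mod_eq_emod_of_pos (by norm_num), h]

theorem getD_twobit2base (v : Int) :
    twobit2base.getD (PySem.Int.mod v 4) [] = [digitChar v] := by
  have h4 : (0 : Int) < 4 := by norm_num
  have he : PySem.Int.mod v 4 = v % 4 := PySem.Int.mod_eq_emod_of_pos h4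
  have h0 : 0 ≤ v % 4 := Int.emod_nonneg v (by norm_num)
  have h1 : v % 4 < 4 := Int.emod_lt_of_pos v h4
  unfold digitChar
  rw [he]
  set m := v % 4 with hm
  interval_cases m <;> decide

def iterSteps : Nat → (List Char × Int) → List Char × Int
  | 0, st => st
  | n + 1, st => iterSteps n (hash2seqStep st)

theorem foldl_const_eq_iterSteps (l : List Int) (st : List Char × Int) :
    l.foldl (fun st _ => hash2seqStep st) st = iterSteps l.length st := by
  induction l generalizing st with
  | nil => rfl
  | cons x xs ih => simp [List.foldl, iterSteps, ih]

theorem iterSteps_eq (n : Nat) (v : Int) (acc : List Char) :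
    iterSteps n (acc, v)
      = (acc ++ (List.range n).map (fun (j : Nat) => digitChar (v >>> ((2 * j : Nat)))), v >>> ((2 * n : Nat))) := by
  induction n generalizing v acc with
  | zero => simp [iterSteps]
  | succ n ih =>
    rw [iterSteps, hash2seqStep]
    simp only [getD_twobit2base]
    rw [ih]
    have hsh : ∀ j : Nat, v >>> (2 : Nat) >>> ((2 * j : Nat)) = v >>> ((2 * (j + 1) : Nat)) := by
      intro j
      rw [← Int.shiftRight_add]
      congr 1
      ring
    refine Prod.ext ?_ ?_
    · simp only [List.range_succ_eq_map, List.map_cons, List.map_map]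
      simp only [hsh]
      simp [List.append_assoc]
    · simpa using hsh n

-- A's closed form: the k digits of v, least significant first, then reversed
theorem hash2seq_closed (v : Int) (k : Int) :
    hash2seq v k
      = String.ofList (((List.range k.toNat).map
          (fun (j : Nat) => digitChar (v >>> ((2 * j : Nat))))).reverse) := by
  unfold hash2seq
  rw [foldl_const_eq_iterSteps, PySem.List.length_pyRange_one, iterSteps_eq, Int.sub_zero]
  simp [PySem.List.slice?_none_none_neg_one]

-- the residue of x modulo 4^K has the same 2-bit digits as x at every position below K
theorem shift_emod (x : Int) (i K : Nat) (h : i < K) :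
    ((x % ((4 : Int) ^ K)) >>> ((2 * i : Nat))) % 4 = (x >>> ((2 * i : Nat))) % 4 := by
  have h2 : ((4 : Int) ^ K) = 2 ^ (2 * i) * (4 * 2 ^ (2 * (K - i) - 2)) := by
    have h4 : (4 : Int) = 2 ^ 2 := by norm_num
    rw [h4, ← pow_mul, ← pow_add, ← pow_add]
    congr 1
    omega
  set q : Int := x / (4 : Int) ^ K with hq
  have hx : x % (4 : Int) ^ K = x + (-(4 * 2 ^ (2 * (K - i) - 2) * q)) * 2 ^ (2 * i) := by
    rw [Int.emod_def, ← hq, h2]; ring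
  rw [Int.shiftRight_eq_div_pow, Int.shiftRight_eq_div_pow, hx]
  push_cast
  rw [Int.add_mul_ediv_right _ _ (by positivity : ((2 : Int) ^ (2 * i)) ≠ 0)]
  have hr : (-(4 * 2 ^ (2 * (K - i) - 2) * q)) = 4 * (-(2 ^ (2 * (K - i) - 2) * q)) := by ring
  rw [hr, Int.add_mul_emod_self_left]

-- the block table, looked up at a byte, yields that byte's four digits MSB-first
set_option maxRecDepth 8000 in
theorem blocks_lookup_fin : ∀ m : Fin 256,
    PySem.List.pyGetD blocksB (((m : Nat) : Int)) [] =
      [digitChar ((((m : Nat) : Int)) >>> (6 : Nat)), digitChar ((((m : Nat) : Int)) >>> (4 : Nat)),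
       digitChar ((((m : Nat) : Int)) >>> (2 : Nat)), digitChar (((m : Nat) : Int))] := by
  decide

-- one block of B = four digits of u, MSB-first
theorem row_eq (u : Int) (j : Nat) :
    PySem.List.pyGetD blocksB (PySem.Int.mod (u >>> ((8 * j : Nat))) 256) [] =
      [digitChar (u >>> ((2 * (4 * j + 3) : Nat))), digitChar (u >>> ((2 * (4 * j + 2) : Nat))),
       digitChar (u >>> ((2 * (4 * j + 1) : Nat))), digitChar (u >>> ((2 * (4 * j) : Nat)))] := by
  set x : Int := u >>> ((8 * j : Nat)) with hxd
  have hm : PySem.Int.mod x 256 = x % 256 := PySem.Int.mod_eq_emod_of_pos (by norm_num)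
  have h0 : 0 ≤ x % 256 := Int.emod_nonneg x (by norm_num)
  have h1 : x % 256 < 256 := Int.emod_lt_of_pos x (by norm_num)
  have hcast : (((x % 256).toNat : Int)) = x % 256 := Int.toNat_of_nonneg h0
  have hfin := blocks_lookup_fin ⟨(x % 256).toNat, by omega⟩
  simp only [hcast] at hfin
  rw [hm, hfin]
  have h256 : (256 : Int) = (4 : Int) ^ (4 : Nat) := by norm_num
  have hshift : ∀ t : Nat, t < 4 → ((x % 256) >>> ((2 * t : Nat))) % 4 = (u >>> ((2 * (4 * j + t) : Nat))) % 4 := by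
    intro t ht
    rw [h256, shift_emod x t 4 ht, hxd, ← Int.shiftRight_add]
    congr 2
    omega
  have e3 := digitChar_congr (hshift 3 (by omega))
  have e2 := digitChar_congr (hshift 2 (by omega))
  have e1 := digitChar_congr (hshift 1 (by omega))
  have e0 := digitChar_congr (hshift 0 (by omega))
  rw [show ((2 * 3 : Nat)) = (6 : Nat) from rfl] at e3
  rw [show ((2 * 2 : Nat)) = (4 : Nat) from rfl] at e2
  rw [show ((2 * 1 : Nat)) = (2 : Nat) from rfl] at e1
  rw [show ((2 * 0 : Nat)) = (0 : Nat) from rfl, Int.shiftRight_zero] at e0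
  rw [e3, e2, e1, e0]
  norm_num

-- the reversed concatenation of the first n blocks = the first 4n digits, reversed
theorem flatten_blocks (u : Int) (n : Nat) :
    (((List.range n).map
        (fun (j : Nat) => PySem.List.pyGetD blocksB (PySem.Int.mod (u >>> ((8 * j : Nat))) 256) [])).reverse).flatten
      = ((List.range (4 * n)).map (fun (i : Nat) => digitChar (u >>> ((2 * i : Nat))))).reverse := by
  induction n with
  | zero => simp
  | succ n ih =>
    rw [List.range_succ, show 4 * (n + 1) = 4 * n + 4 by ring, List.range_add]
    simp only [List.map_append, List.reverse_append, List.flatten_append, ih]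
    rw [show (List.range 4).map (fun x => 4 * n + x) = [4 * n, 4 * n + 1, 4 * n + 2, 4 * n + 3] from rfl]
    simp only [List.map_cons, List.map_nil, List.reverse_cons, List.reverse_nil, List.nil_append,
      List.flatten, List.append_nil, List.flatten_cons, row_eq]
    have c3 : 2 * (4 * n + 3) = 2 * (4 * n) + 6 := by ring
    have c2 : 2 * (4 * n + 2) = 2 * (4 * n) + 4 := by ring
    have c1 : 2 * (4 * n + 1) = 2 * (4 * n) + 2 := by ring
    simp [c3, c2, c1]

theorem hash2seq_spec : Claim_equal_hash2seq := by
  intro v k _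
  show hash2seq v k = hash2seq_alt v k
  rw [hash2seq_closed]
  unfold hash2seq_alt
  by_cases hk : k ≤ 0
  · simp only [if_pos hk]
    rw [show k.toNat = 0 by omega]
    simp
  · simp only [if_neg hk]
    set kn := k.toNat with hkn
    have hkpos : 0 < k := by omega
    set u : Int := PySem.Int.mod v ((4 : Int) ^ kn) with hu
    set nb : Int := -(PySem.Int.floordiv (-k) 4) with hnb
    -- bounds on nb = ceil(k/4)
    have hfd : PySem.Int.floordiv (-k) 4 = (-k) / 4 := PySem.Int.floordiv_eq_ediv_of_pos (by norm_num)
    have hdm : 4 * ((-k) / 4) + (-k) % 4 = -k := by rw [Int.emod_def]; ring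
    have hm0 : 0 ≤ (-k) % 4 := Int.emod_nonneg _ (by norm_num)
    have hm1 : (-k) % 4 < 4 := Int.emod_lt_of_pos _ (by norm_num)
    have hnbb : 4 * nb - 3 ≤ k ∧ k ≤ 4 * nb := by rw [hnb, hfd]; omega
    set nbn := nb.toNat with hnbn
    have hnbc : (nbn : Int) = nb := Int.toNat_of_nonneg (by omega)
    have hkle : kn ≤ 4 * nbn := by omega
    -- rewrite the countdown range as a reversed forward range of Nats
    rw [PySem.List.pyRange_neg_one_eq_reverse]
    rw [show (-1 : Int) + 1 = 0 by norm_num, show nb - 1 + 1 = nb by ring]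
    rw [PySem.List.pyRange_one, Int.sub_zero, ← hnbc, Int.toNat_natCast, List.map_reverse, List.map_map]
    have hptw : ∀ j ∈ List.range nbn,
        ((fun (j : Int) => PySem.List.pyGetD blocksB (PySem.Int.mod (u >>> (((8 * j).toNat : Nat) : Int)) 256) []) ∘ fun (k : Nat) => (0 : Int) + ↑k) j
          = PySem.List.pyGetD blocksB (PySem.Int.mod (u >>> ((8 * j : Nat))) 256) [] := by
      intro j _
      simp only [Function.comp_apply, Int.zero_add]
      rw [Int.shiftRight_natCast_right, show ((8 * (j : Int)).toNat) = (8 * j : Nat) by omega]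
    rw [List.map_congr_left hptw, flatten_blocks]
    -- the slice: drop the high padding digits
    have hlen : (((List.range (4 * nbn)).map (fun (i : Nat) => digitChar (u >>> ((2 * i : Nat))))).reverse).length = 4 * nbn := by
      simp
    rw [hlen, PySem.List.slice_from _ (by push_cast; omega)]
    rw [show (((4 * nbn : Nat) : Int) - k).toNat = 4 * nbn - kn by omega]
    rw [show 4 * nbn = kn + (4 * nbn - kn) by omega, List.range_add, List.map_append,
      List.reverse_append]
    rw [List.drop_left' (by simp)]
    congr 1
    congr 1
    apply List.map_congr_left
    intro j hj
    have hjk : j < kn := List.mem_range.mp hj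
    apply digitChar_congr
    rw [hu, PySem.Int.mod_eq_emod_of_pos (by positivity)]
    exact (shift_emod v j kn hjk).symm
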